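-- pv_equiv track=rewrite | github.com/SoochowRobinChen/leetcode | leetcode_problems/top75/151_reverse_words_in_string.py | trim_spaces
-- ===== SOURCE A (Python) =====
-- def trim_spaces(s):
--     left, right = 0, len(s) - 1
--
--     # remove leading space
--     while left <= right and s[left] == ' ':
--         left += 1
--
--     # remove tailling space
--     while left <= right and s[right] == ' ':
--         right -= 1
--
--     # reduce multiple space into one
--     output = []
--     while left <= right:
--         if s[left] != ' ':
--             output.append(s[left])
--         elif output[-1] != ' ':
--             output.append(' ')
--         left += 1
--
--     return output
-- ===== SOURCE B (Python) =====
-- def trim_spaces(s):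
--     words = [w for w in s.split(' ') if w]
--     return list(' '.join(words))
-- ===== Notes on version B (the rewrite author's own statement) =====
-- stated objective: faster
-- what changed: Replaces the two-pointer trim loops and the char-by-char collapse loop with a split-on-space / filter / join pipeline over whole words.
import Mathlib
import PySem

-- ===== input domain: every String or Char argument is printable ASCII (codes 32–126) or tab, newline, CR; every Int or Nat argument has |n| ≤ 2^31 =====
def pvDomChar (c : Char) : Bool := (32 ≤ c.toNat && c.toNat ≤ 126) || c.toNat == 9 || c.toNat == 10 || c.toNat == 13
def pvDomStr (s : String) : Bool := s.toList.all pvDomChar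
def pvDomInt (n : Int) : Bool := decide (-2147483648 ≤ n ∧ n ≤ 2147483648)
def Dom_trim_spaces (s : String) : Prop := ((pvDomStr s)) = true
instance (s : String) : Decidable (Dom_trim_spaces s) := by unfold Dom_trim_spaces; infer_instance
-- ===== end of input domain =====

-- B replaces A's two-pointer trim loops and char-by-char collapse loop with a split(' ')/filter/join word pipeline; same return value for every input.


-- ===== PORT A =====
-- the first while loop: advance `left` past leading spaces (rendered on the char list by dropping leading spaces)
def trimLeadA : List Char → List Char
  | [] => []
  | c :: rest => if c = ' ' then trimLeadA rest else c :: rest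

-- the third while loop: copy non-spaces, collapse space runs (the `output[-1]` test becomes `getLast?`)
def collapseA : List Char → List String → List String
  | [], out => out
  | c :: rest, out =>
    if c ≠ ' ' then collapseA rest (out ++ [String.ofList [c]])
    else if out.getLast? ≠ some " " then collapseA rest (out ++ [" "])
    else collapseA rest out

def trim_spaces (s : String) : List String :=
  -- remove leading space
  let m := trimLeadA s.toList
  -- remove tailling space (the second while loop scans back from the right end)
  let r := (trimLeadA m.reverse).reverse
  -- reduce multiple space into one
  collapseA r []

-- ===== PORT B =====
def trim_spaces_alt (s : String) : List String :=
  let words := (PySem.Chars.splitOn s.toList [' ']).filter (fun w => w ≠ [])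
  (PySem.Chars.join [' '] words).map (fun c => String.ofList [c])

-- ===== PRECONDITION & SPEC =====
def Spec_trim_spaces (s : String) (out : List String) : Prop := out = trim_spaces_alt s
instance (s : String) (out : List String) : Decidable (Spec_trim_spaces s out) := by unfold Spec_trim_spaces; infer_instance

-- ===== CLAIM (what is proved, stated in full; the proofs are below) =====
def Claim_equal_trim_spaces : Prop := ∀ (s : String), Dom_trim_spaces s → Spec_trim_spaces s (trim_spaces s)

-- ===== LEMMAS AND PROOFS =====
def splitSp (pre : List Char) : List Char → List (List Char)
  | [] => [pre]
  | c :: t => if c = ' ' then pre :: splitSp [] t else splitSp (pre ++ [c]) t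

theorem splitOn_go_space : ∀ (l : List Char) (fuel : Nat) (cur : List Char) (acc : List (List Char)),
    l.length ≤ fuel →
    PySem.Chars.splitOn.go [' '] fuel l cur acc = acc.reverse ++ splitSp cur.reverse l := by
  intro l
  induction l with
  | nil =>
    intro fuel cur acc _
    cases fuel <;> simp [PySem.Chars.splitOn.go, splitSp]
  | cons c rest ih =>
    intro fuel cur acc h
    cases fuel with
    | zero => simp at h
    | succ f =>
      by_cases hc : c = ' '
      · subst hc
        simp only [PySem.Chars.splitOn.go, List.isPrefixOf, splitSp]
        simp [ih rest.length, ih, splitSp, List.isPrefixOf]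
        rw [ih _ _ _ (by simpa using h)]
        simp [splitSp]
      · simp only [PySem.Chars.splitOn.go]
        rw [if_neg (by simp [List.isPrefixOf, hc, Ne.symm hc] )]
        rw [ih _ _ _ (by simpa using Nat.le_of_succ_le_succ h)]
        simp [splitSp, hc]

theorem splitOn_space (l : List Char) : PySem.Chars.splitOn l [' '] = splitSp [] l := by
  have := splitOn_go_space l (l.length + 1) [] [] (by omega)
  simpa [PySem.Chars.splitOn] using this

def myJoin : List (List Char) → List Char
  | [] => []
  | [w] => w
  | w :: ws => w ++ ' ' :: myJoin (ws)

theorem join_space_eq (ws : List (List Char)) : PySem.Chars.join [' '] ws = myJoin ws := by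
  induction ws with
  | nil => simp [PySem.Chars.join, myJoin, List.intercalate]
  | cons w ws ih =>
    cases ws with
    | nil => simp [PySem.Chars.join, myJoin, List.intercalate]
    | cons v vs =>
      simp [PySem.Chars.join, List.intercalate, List.intersperse] at ih ⊢
      simp [myJoin, ← ih]

def spec : List Char → Bool → List Char
  | [], _ => []
  | c :: t, b =>
    if c ≠ ' ' then c :: spec t false
    else if !b then ' ' :: spec t true
    else spec t b

def J (ws : List (List Char)) : List Char := myJoin (ws.filter (fun w => w ≠ []))

-- every split of a list whose last char is not a space contains a nonempty word
theorem exists_nonempty_word : ∀ (t : List Char) (pre : List Char), t ≠ [] → t.getLast? ≠ some ' ' →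
    ∃ w ∈ splitSp pre t, w ≠ [] := by
  intro t
  induction t with
  | nil => simp
  | cons c u ih =>
    intro pre _ hlast
    cases u with
    | nil =>
      have hc : c ≠ ' ' := by simpa using hlast
      refine ⟨pre ++ [c], by simp [splitSp, hc], by simp⟩
    | cons d v =>
      have hlast' : (d :: v).getLast? ≠ some ' ' := by
        simpa [List.getLast?_cons_cons] using hlast
      by_cases hc : c = ' '
      · subst hc
        obtain ⟨w, hw, hne⟩ := ih [] (by simp) hlast'
        refine ⟨w, ?_, hne⟩
        simp only [splitSp, if_pos rfl]
        exact List.mem_cons_of_mem _ hw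
      · obtain ⟨w, hw, hne⟩ := ih (pre ++ [c]) (by simp) hlast'
        refine ⟨w, ?_, hne⟩
        simp only [splitSp, if_neg hc]
        exact hw

theorem filter_ne_nil_of_word {t : List Char} (h : t ≠ []) (h2 : t.getLast? ≠ some ' ') :
    (splitSp [] t).filter (fun w => w ≠ []) ≠ [] := by
  obtain ⟨w, hw, hne⟩ := exists_nonempty_word t [] h h2
  intro hf
  have := List.filter_eq_nil_iff.mp hf w hw
  simp [hne] at this

theorem myJoin_cons {w : List Char} {F : List (List Char)} (h : F ≠ []) :
    myJoin (w :: F) = w ++ ' ' :: myJoin F := by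
  cases F with
  | nil => exact absurd rfl h
  | cons v vs => rfl

theorem spec_join : ∀ (t : List Char), t.getLast? ≠ some ' ' →
    (spec t true = J (splitSp [] t)) ∧
    (∀ pre, pre ≠ [] → pre ++ spec t false = J (splitSp pre t)) := by
  intro t
  induction t with
  | nil =>
    intro _
    constructor
    · simp [spec, splitSp, J, myJoin]
    · intro pre hpre
      simp [spec, splitSp, J, List.filter_cons, hpre, myJoin]
  | cons c u ih =>
    intro hlast
    by_cases hc : c = ' '
    · subst hc
      have hu0 : u ≠ [] := by
        rintro rfl; simp at hlast
      have hu : u.getLast? ≠ some ' ' := by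
        cases u with
        | nil => simp
        | cons d v => simpa [List.getLast?_cons_cons] using hlast
      obtain ⟨ih1, ih2⟩ := ih hu
      have hF : (splitSp [] u).filter (fun w => w ≠ []) ≠ [] := filter_ne_nil_of_word hu0 hu
      constructor
      · show spec (' ' :: u) true = J (splitSp [] (' ' :: u))
        simp only [spec, splitSp, if_pos rfl, if_neg (by simp : ¬ (' ' ≠ ' ')), Bool.not_true]
        simp only [J, List.filter_cons]
        simpa [J] using ih1
      · intro pre hpre
        show pre ++ spec (' ' :: u) false = J (splitSp pre (' ' :: u))
        simp only [spec, splitSp, if_neg (by simp : ¬ (' ' ≠ ' ')), Bool.not_false, if_true]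
        simp only [J]
        rw [List.filter_cons, if_pos (by simpa using hpre), myJoin_cons hF, ih1]
        rfl
    · have hu : u.getLast? ≠ some ' ' := by
        cases u with
        | nil => simp
        | cons d v => simpa [List.getLast?_cons_cons] using hlast
      obtain ⟨ih1, ih2⟩ := ih hu
      constructor
      · show spec (c :: u) true = J (splitSp [] (c :: u))
        simp only [spec, if_pos hc, splitSp, if_neg hc]
        have := ih2 [c] (by simp)
        simpa using this
      · intro pre hpre
        show pre ++ spec (c :: u) false = J (splitSp pre (c :: u))
        simp only [spec, if_pos hc, splitSp, if_neg hc]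
        have := ih2 (pre ++ [c]) (by simp)
        rw [← this]
        simp

theorem ofList_singleton_eq_space (c : Char) : (String.ofList [c] = " ") ↔ c = ' ' := by
  constructor
  · intro h
    have := congrArg String.toList h
    simpa using this
  · rintro rfl; rfl

theorem spec_false_eq_true (l : List Char) (h : l.head? ≠ some ' ') : spec l false = spec l true := by
  cases l with
  | nil => rfl
  | cons c t =>
    have hc : c ≠ ' ' := by simpa using h
    simp [spec, hc]

theorem collapseA_eq (l : List Char) : ∀ out : List String,
    collapseA l out = out ++ (spec l (out.getLast? == some " ")).map (fun c => String.ofList [c]) := by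
  induction l with
  | nil => intro out; simp [collapseA, spec]
  | cons c t ih =>
    intro out
    by_cases hc : c = ' '
    · subst hc
      by_cases hlast : out.getLast? = some " "
      · rw [show collapseA (' ' :: t) out = collapseA t out from by
            simp [collapseA, hlast]]
        rw [ih]
        simp [spec, hlast]
      · rw [show collapseA (' ' :: t) out = collapseA t (out ++ [" "]) from by
            simp [collapseA, hlast]]
        rw [ih]
        simp [spec, hlast, List.getLast?_append]
    · rw [show collapseA (c :: t) out = collapseA t (out ++ [String.ofList [c]]) from by
          simp [collapseA, hc]]
      rw [ih]
      have : ((out ++ [String.ofList [c]]).getLast? == some " ") = false := by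
        simp [List.getLast?_append, ofList_singleton_eq_space, hc]
      rw [this]
      simp [spec, hc]

theorem trimLeadA_head? (l : List Char) : (trimLeadA l).head? ≠ some ' ' := by
  induction l with
  | nil => simp [trimLeadA]
  | cons c t ih =>
    by_cases hc : c = ' '
    · simpa [trimLeadA, hc] using ih
    · simp [trimLeadA, hc]

theorem trimLeadA_decomp (l : List Char) : ∃ t, (∀ c ∈ t, c = ' ') ∧ l = t ++ trimLeadA l := by
  induction l with
  | nil => exact ⟨[], by simp, by simp [trimLeadA]⟩
  | cons c u ih =>
    by_cases hc : c = ' '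
    · obtain ⟨t, ht, hu⟩ := ih
      subst hc
      exact ⟨' ' :: t, by simpa using ht, by simpa [trimLeadA] using hu⟩
    · exact ⟨[], by simp, by simp [trimLeadA, hc]⟩

theorem splitSp_spaces (t : List Char) : ∀ pre, (∀ c ∈ t, c = ' ') →
    splitSp pre t = pre :: t.map (fun _ => ([] : List Char)) := by
  induction t with
  | nil => intro pre _; simp [splitSp]
  | cons c u ih =>
    intro pre h
    have hc : c = ' ' := h c (by simp)
    subst hc
    rw [show splitSp pre (' ' :: u) = pre :: splitSp [] u from by simp [splitSp]]
    rw [ih [] (fun c hc => h c (by simp [hc]))]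
    simp

theorem splitSp_append_spaces (xs : List Char) : ∀ pre (t : List Char), (∀ c ∈ t, c = ' ') →
    splitSp pre (xs ++ t) = splitSp pre xs ++ t.map (fun _ => ([] : List Char)) := by
  induction xs with
  | nil =>
    intro pre t h
    simp [splitSp_spaces t pre h, splitSp]
  | cons c u ih =>
    intro pre t h
    by_cases hc : c = ' '
    · subst hc
      rw [show (' ' :: u) ++ t = ' ' :: (u ++ t) from rfl]
      rw [show splitSp pre (' ' :: (u ++ t)) = pre :: splitSp [] (u ++ t) from by simp [splitSp]]
      rw [ih [] t h]
      simp [splitSp]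
    · rw [show (c :: u) ++ t = c :: (u ++ t) from rfl]
      rw [show splitSp pre (c :: (u ++ t)) = splitSp (pre ++ [c]) (u ++ t) from by simp [splitSp, hc]]
      rw [ih (pre ++ [c]) t h]
      simp [splitSp, hc]

theorem filter_splitSp_spaces_prefix (t : List Char) : ∀ xs, (∀ c ∈ t, c = ' ') →
    (splitSp [] (t ++ xs)).filter (fun w => w ≠ []) = (splitSp [] xs).filter (fun w => w ≠ []) := by
  induction t with
  | nil => intro xs _; rfl
  | cons c u ih =>
    intro xs h
    have hc : c = ' ' := h c (by simp)
    subst hc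
    rw [show (' ' :: u) ++ xs = ' ' :: (u ++ xs) from rfl]
    rw [show splitSp [] (' ' :: (u ++ xs)) = [] :: splitSp [] (u ++ xs) from by simp [splitSp]]
    rw [List.filter_cons]
    simp only [show (decide (([] : List Char) ≠ [])) = false from by simp, if_false]
    exact ih xs (fun c hc => h c (by simp [hc]))

theorem main (s : String) : trim_spaces s = trim_spaces_alt s := by
  unfold trim_spaces trim_spaces_alt
  set l := s.toList with hl
  set m := trimLeadA l with hm
  set r := (trimLeadA m.reverse).reverse with hr
  -- r has no trailing space
  have hlast_r : r.getLast? ≠ some ' ' := by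
    rw [hr, List.getLast?_reverse]
    exact trimLeadA_head? m.reverse
  -- decompositions
  obtain ⟨t0, ht0, hdec0⟩ := trimLeadA_decomp l
  obtain ⟨t1, ht1, hdec1⟩ := trimLeadA_decomp m.reverse
  have hmr : m = r ++ t1.reverse := by
    have := congrArg List.reverse hdec1
    simpa [hr] using this
  have ht1r : ∀ c ∈ t1.reverse, c = ' ' := fun c hc => ht1 c (by simpa using hc)
  -- r has no leading space
  have hhead_r : r.head? ≠ some ' ' := by
    cases hre : r with
    | nil => simp
    | cons a rs =>
      have hm_head : m.head? ≠ some ' ' := trimLeadA_head? l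
      rw [hmr, hre] at hm_head
      simpa using hm_head
  -- A side
  rw [collapseA_eq r []]
  simp only [List.getLast?_nil, List.nil_append]
  rw [show ((none : Option String) == some " ") = false from rfl]
  rw [spec_false_eq_true r hhead_r]
  rw [(spec_join r hlast_r).1]
  -- B side
  rw [splitOn_space, join_space_eq]
  -- identify the filtered word lists
  have : (splitSp [] l).filter (fun w => w ≠ []) = (splitSp [] r).filter (fun w => w ≠ []) := by
    rw [hdec0, filter_splitSp_spaces_prefix t0 _ ht0]
    rw [← hm, hmr, splitSp_append_spaces r [] t1.reverse ht1r]
    rw [List.filter_append]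
    simp
  rw [this]
  rfl

-- ===== VERDICT =====
theorem trim_spaces_spec : Claim_equal_trim_spaces := by
  intro s _
  exact main s
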